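-- pv_equiv track=rewrite | github.com/xmasny/beatsaber-map-generator | training/beats.py | fill_beat_list
-- ===== SOURCE A (Python) =====
-- def fill_beat_list(bar_beat_list):
--     """Pad the bars where no notes exist.
--     Parameters
--     ----------
--     bar_beat_list
--
--     Returns
--     -------
--
--     """
--     max_bar = bar_beat_list[-1][0]
--     bar_dic = {bar: in_bar for bar, in_bar in bar_beat_list}
--     return_values = []
--     for bar in range(1, max_bar + 1):
--         if bar in bar_dic:
--             in_bar = bar_dic[bar]
--             return_values.append(tuple(in_bar))
--         else:
--             return_values.append(())
--     return return_values
-- ===== SOURCE B (Python) =====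
-- def fill_beat_list(bar_beat_list):
--     """Pad the bars where no notes exist (scatter into a pre-filled output)."""
--     max_bar = bar_beat_list[-1][0]
--     result = [() for _ in range(max_bar)]
--     for bar, in_bar in bar_beat_list:
--         if 1 <= bar <= max_bar:
--             result[bar - 1] = tuple(in_bar)
--     return result
-- ===== Notes on version B (the rewrite author's own statement) =====
-- stated objective: alternative
-- what changed: Instead of building a dict index and then gathering over range(1, max_bar+1) with per-bar membership tests and lookups, B pre-allocates the output as max_bar empty tuples and scatters each (bar, in_bar) directly into slot bar-1 in a single pass (last write wins, matching dict overwrite).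
import Mathlib
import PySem

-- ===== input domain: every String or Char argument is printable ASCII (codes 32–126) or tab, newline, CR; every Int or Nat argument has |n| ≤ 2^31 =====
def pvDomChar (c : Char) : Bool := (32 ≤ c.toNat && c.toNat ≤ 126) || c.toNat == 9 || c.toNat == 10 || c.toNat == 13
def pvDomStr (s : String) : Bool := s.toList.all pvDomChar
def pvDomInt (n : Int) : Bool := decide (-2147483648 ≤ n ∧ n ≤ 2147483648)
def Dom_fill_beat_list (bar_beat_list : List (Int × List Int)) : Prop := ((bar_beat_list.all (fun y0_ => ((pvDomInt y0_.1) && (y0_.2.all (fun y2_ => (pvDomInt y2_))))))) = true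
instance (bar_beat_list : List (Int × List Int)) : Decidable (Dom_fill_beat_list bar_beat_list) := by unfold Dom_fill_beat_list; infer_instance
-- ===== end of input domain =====

-- B scatters each (bar, in_bar) into a pre-allocated list of max_bar empty slots in one pass,
-- replacing A's dict index + gather over range(1, max_bar+1) (alternative decomposition, same cost).


-- ===== PORT A =====
def fill_beat_list (bar_beat_list : List (Int × List Int)) : List (List Int) :=
  match PySem.List.pyGet? bar_beat_list (-1) with
  | none => []  -- unreachable under Pre_ (Python raises IndexError here)
  | some last =>
    let max_bar := last.1
    let bar_dic : PySem.Dict Int (List Int) :=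
      bar_beat_list.foldl (fun d p => d.insert p.1 p.2) PySem.Dict.empty
    (PySem.List.pyRange 1 (max_bar + 1) 1).foldl
      (fun acc bar =>
        if bar_dic.contains bar then acc ++ [bar_dic.getD bar []]
        else acc ++ [([] : List Int)]) []

-- ===== PORT B =====
def fill_beat_list_alt (bar_beat_list : List (Int × List Int)) : List (List Int) :=
  match PySem.List.pyGet? bar_beat_list (-1) with
  | none => []  -- unreachable under Pre_ (Python raises IndexError here)
  | some last =>
    let max_bar := last.1
    let init : List (List Int) := (PySem.List.pyRange 0 max_bar 1).map (fun _ => [])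
    bar_beat_list.foldl
      (fun res p =>
        if 1 ≤ p.1 ∧ p.1 ≤ max_bar then PySem.List.pySetD res (p.1 - 1) p.2 else res)
      init

-- ===== PRECONDITION & SPEC =====
-- Pre_ excludes only the empty list, on which both A and B raise IndexError at bar_beat_list[-1].
def Pre_fill_beat_list (bar_beat_list : List (Int × List Int)) : Prop := bar_beat_list ≠ []
instance (bar_beat_list : List (Int × List Int)) : Decidable (Pre_fill_beat_list bar_beat_list) := by unfold Pre_fill_beat_list; infer_instance
def pvWitness_fill_beat_list : (List (Int × List Int)) := [(1, [0, 2]), (3, [1])]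

def Spec_fill_beat_list (bar_beat_list : List (Int × List Int)) (out : List (List Int)) : Prop := out = fill_beat_list_alt bar_beat_list
instance (bar_beat_list : List (Int × List Int)) (out : List (List Int)) : Decidable (Spec_fill_beat_list bar_beat_list out) := by unfold Spec_fill_beat_list; infer_instance

-- ===== CLAIM (what is proved, stated in full; the proofs are below) =====
def Claim_equal_fill_beat_list : Prop := ∀ (bar_beat_list : List (Int × List Int)), Dom_fill_beat_list bar_beat_list → Pre_fill_beat_list bar_beat_list → Spec_fill_beat_list bar_beat_list (fill_beat_list bar_beat_list)

-- ===== LEMMAS AND PROOFS =====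

-- The value both programs place at slot (k-1): the LAST pair of l with key k, else [].
def lastVal (l : List (Int × List Int)) (k : Int) : Option (List Int) :=
  (l.reverse.find? (fun p => p.1 == k)).map Prod.snd

theorem lastVal_nil (k : Int) : lastVal [] k = none := rfl

theorem lastVal_cons (p : Int × List Int) (l : List (Int × List Int)) (k : Int) :
    lastVal (p :: l) k = (lastVal l k).or (if p.1 = k then some p.2 else none) := by
  unfold lastVal
  rw [List.reverse_cons, List.find?_append]
  cases h : l.reverse.find? (fun q => q.1 == k) with
  | some q => simp
  | none => by_cases hk : p.1 = k <;> simp [hk]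

-- A's dict lookup after the building fold is exactly lastVal (last insert wins).
theorem dict_get_foldl (l : List (Int × List Int)) (d : PySem.Dict Int (List Int)) (k : Int) :
    (l.foldl (fun d p => d.insert p.1 p.2) d).get? k = (lastVal l k).or (d.get? k) := by
  induction l generalizing d with
  | nil => simp [lastVal_nil]
  | cons p t ih =>
    rw [List.foldl_cons, ih, lastVal_cons]
    cases hv : lastVal t k with
    | some v => simp
    | none =>
      simp only [Option.none_or]
      rw [PySem.Dict.get?_insert]
      by_cases hk : p.1 = k
      · simp [hk]
      · simp [hk, Ne.symm hk]

-- length is preserved by B's scatter fold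
theorem scatter_length (l : List (Int × List Int)) (m : Int) (res : List (List Int)) :
    (l.foldl (fun res p =>
      if 1 ≤ p.1 ∧ p.1 ≤ m then PySem.List.pySetD res (p.1 - 1) p.2 else res) res).length
      = res.length := by
  induction l generalizing res with
  | nil => rfl
  | cons p t ih =>
    rw [List.foldl_cons]
    split_ifs with h
    · rw [ih, PySem.List.pySetD_of_nonneg res p.2 (by omega), List.length_set]
    · rw [ih]

-- element invariant of B's scatter fold
theorem scatter_getElem (l : List (Int × List Int)) (m : Int) (res : List (List Int))
    (hlen : res.length = m.toNat) (i : Nat) (hi : i < m.toNat) :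
    (l.foldl (fun res p =>
      if 1 ≤ p.1 ∧ p.1 ≤ m then PySem.List.pySetD res (p.1 - 1) p.2 else res) res)[i]?
      = (lastVal l ((i : Int) + 1)).or res[i]? := by
  induction l generalizing res with
  | nil => simp [lastVal_nil]
  | cons p t ih =>
    rw [List.foldl_cons, lastVal_cons]
    by_cases h : 1 ≤ p.1 ∧ p.1 ≤ m
    · simp only [if_pos h]
      rw [PySem.List.pySetD_of_nonneg res p.2 (by omega),
        ih (res.set (p.1 - 1).toNat p.2) (by rw [List.length_set]; exact hlen)]
      cases hv : lastVal t ((i : Int) + 1) with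
      | some v => simp
      | none =>
        simp only [Option.none_or]
        rw [List.getElem?_set]
        by_cases hk : p.1 = (i : Int) + 1
        · have hidx : (p.1 - 1).toNat = i := by omega
          rw [if_pos hidx, if_pos (show (p.1 - 1).toNat < res.length by omega), if_pos hk]
          simp
        · have hidx : (p.1 - 1).toNat ≠ i := by omega
          rw [if_neg hidx, if_neg hk]
          simp
    · simp only [if_neg h]
      rw [ih res hlen]
      cases hv : lastVal t ((i : Int) + 1) with
      | some v => simp
      | none =>
        have hk : p.1 ≠ (i : Int) + 1 := by omega
        simp [hk]

-- ===== VERDICT (by name: the statement is the Claim_ definition above) =====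
theorem fill_beat_list_spec : Claim_equal_fill_beat_list := by
  intro l _ hne
  unfold Spec_fill_beat_list fill_beat_list fill_beat_list_alt
  cases hg : PySem.List.pyGet? l (-1) with
  | none => rfl  -- unreachable under Pre_; both ports return [] here
  | some last =>
    simp only
    set m := last.1 with hm
    have hA :
        (PySem.List.pyRange 1 (m + 1) 1).foldl
          (fun acc bar =>
            if (l.foldl (fun d p => d.insert p.1 p.2)
                  (PySem.Dict.empty : PySem.Dict Int (List Int))).contains bar then
              acc ++ [(l.foldl (fun d p => d.insert p.1 p.2)
                  (PySem.Dict.empty : PySem.Dict Int (List Int))).getD bar []]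
            else acc ++ [([] : List Int)]) []
        = (PySem.List.pyRange 1 (m + 1) 1).map
            (fun bar => (lastVal l bar).getD []) := by
      have hfun : ∀ (acc : List (List Int)), ∀ bar ∈ PySem.List.pyRange 1 (m + 1) 1,
          (if (l.foldl (fun d p => d.insert p.1 p.2)
                  (PySem.Dict.empty : PySem.Dict Int (List Int))).contains bar then
              acc ++ [(l.foldl (fun d p => d.insert p.1 p.2)
                  (PySem.Dict.empty : PySem.Dict Int (List Int))).getD bar []]
            else acc ++ [([] : List Int)])
          = acc ++ [(lastVal l bar).getD []] := by
        intro acc bar _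
        rw [PySem.Dict.contains_eq_isSome_get?, PySem.Dict.getD_eq_get?_getD,
          dict_get_foldl, PySem.Dict.get?_empty, Option.or_none]
        cases lastVal l bar <;> simp
      rw [PySem.List.foldl_congr_mem _ _ _ _ hfun,
        PySem.List.foldl_append_singleton_eq_map, List.nil_append]
    rw [hA]
    have hlen_init : ((PySem.List.pyRange 0 m 1).map
        (fun _ => ([] : List Int))).length = m.toNat := by
      rw [List.length_map, PySem.List.length_pyRange_one]; omega
    apply List.ext_getElem?
    intro i
    by_cases hi : i < m.toNat
    · rw [scatter_getElem l m _ hlen_init i hi]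
      have hinit : ((PySem.List.pyRange 0 m 1).map (fun _ => ([] : List Int)))[i]?
          = some [] := by
        rw [List.getElem?_eq_getElem (by rw [hlen_init]; exact hi)]
        simp
      rw [hinit]
      have hrange : (PySem.List.pyRange 1 (m + 1) 1).map (fun bar => (lastVal l bar).getD [])
          = (List.range (m.toNat)).map (fun (k : Nat) => (lastVal l (1 + (k : Int))).getD []) := by
        rw [PySem.List.pyRange_one]
        have h1 : (m + 1 - 1).toNat = m.toNat := by omega
        rw [h1, List.map_map]
        simp [Function.comp]
      rw [hrange, List.getElem?_map, List.getElem?_range hi]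
      have h2 : (1 : Int) + (i : Int) = (i : Int) + 1 := by omega
      simp only [Option.map_some, h2]
      cases lastVal l ((i : Int) + 1) <;> simp
    · have h1 : ((PySem.List.pyRange 1 (m + 1) 1).map
          (fun bar => (lastVal l bar).getD []))[i]? = none := by
        apply List.getElem?_eq_none
        rw [List.length_map, PySem.List.length_pyRange_one]; omega
      have h2 := scatter_length l m ((PySem.List.pyRange 0 m 1).map
          (fun _ => ([] : List Int)))
      rw [h1, List.getElem?_eq_none (by rw [h2, hlen_init]; omega)]
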